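-- pv_equiv track=rewrite | github.com/Parzivalart3mis/SymmetricKeyCiphers | substitution_cipher.py | permutation_cipher_decrypt
-- ===== SOURCE A (Python) =====
-- def permutation_cipher_decrypt(ciphertext, permutation):
--     permutation = [p - 1 for p in permutation]
--     # Creating the inverse permutation
--     inverse_permutation = [0] * len(permutation)
--     for index, value in enumerate(permutation):
--         inverse_permutation[value] = index
--
--     plaintext = []
--     # Decrypting by applying the inverse permutation
--     for i in range(0, len(ciphertext), len(permutation)):
--         block = ciphertext[i:i + len(permutation)]
--         decrypted_block = [''] * len(permutation)
--         for j in range(len(permutation)):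
--             decrypted_block[inverse_permutation[j]] = block[j]
--         plaintext.append(''.join(decrypted_block))
--
--     return ''.join(plaintext).rstrip('X')  # Removing padding
-- ===== SOURCE B (Python) =====
-- def permutation_cipher_decrypt(ciphertext, permutation):
--     # Resolve the key once to absolute 0-based source positions, then gather each
--     # plaintext slot directly as block[src[k]]: no inverse-permutation table and no
--     # scatter loops into preallocated lists.
--     n = len(permutation)
--     positions = list(range(n))
--     src = [positions[p - 1] for p in permutation]
--     blocks = [ciphertext[i:i + n] for i in range(0, len(ciphertext), n)]
--     return ''.join(block[j] for block in blocks for j in src).rstrip('X')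
-- ===== Notes on version B (the rewrite author's own statement) =====
-- stated objective: simpler
-- what changed: B drops A's inverse-permutation table and its two scatter loops into preallocated lists: it resolves the key once to absolute 0-based source positions and gathers each plaintext slot directly as block[src[k]] in one flat comprehension over the blocks.
-- outside the precondition, e.g. on permutation_cipher_decrypt('ab', [1, 1]): A returns 'ba', B returns 'aa'; on permutation_cipher_decrypt('z1', [0, 2]): A returns 'z1', B returns '11'
import Mathlib
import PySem

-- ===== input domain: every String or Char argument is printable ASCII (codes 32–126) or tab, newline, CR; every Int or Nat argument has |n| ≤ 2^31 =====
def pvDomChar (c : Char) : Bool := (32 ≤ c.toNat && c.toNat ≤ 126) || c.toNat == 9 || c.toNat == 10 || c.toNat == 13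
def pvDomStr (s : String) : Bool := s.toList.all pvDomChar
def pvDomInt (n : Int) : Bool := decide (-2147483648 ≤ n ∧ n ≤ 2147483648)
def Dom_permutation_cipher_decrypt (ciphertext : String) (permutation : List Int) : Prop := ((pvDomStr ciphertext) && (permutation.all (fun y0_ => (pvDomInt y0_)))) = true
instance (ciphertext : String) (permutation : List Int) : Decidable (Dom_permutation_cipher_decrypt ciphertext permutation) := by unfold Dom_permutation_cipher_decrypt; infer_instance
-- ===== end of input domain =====

-- B replaces A's inverse-permutation table and its two scatter loops by one flat gather
-- comprehension over the blocks (objective: simpler; same cost).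

-- shared helper: Python's .rstrip('X') — drop trailing 'X' code points (exact on all strings)
def pvRstripX (cs : List Char) : List Char := (cs.reverse.dropWhile (fun c => c == 'X')).reverse

-- ===== PORT A =====
-- pySetD / pyGetD are the total forms of the indexings; they are exact wherever the Python
-- does not raise, and every raising input (IndexError / ValueError) is excluded by Pre_ below.
def permutation_cipher_decrypt (ciphertext : String) (permutation : List Int) : String :=
  let perm := permutation.map (fun p => p - 1)
  let inverse := (PySem.List.enumerate perm).foldl
      (fun inv iv => PySem.List.pySetD inv iv.2 iv.1) (List.replicate perm.length (0 : Int))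
  let cs := ciphertext.toList
  let plaintext := (PySem.List.pyRange 0 cs.length perm.length).foldl
      (fun pt i =>
        let block := PySem.List.slice cs (some i) (some (i + perm.length))
        let db := (PySem.List.pyRange 0 perm.length).foldl
            (fun db j => PySem.List.pySetD db (PySem.List.pyGetD inverse j 0)
                          [PySem.List.pyGetD block j ' '])
            (List.replicate perm.length ([] : List Char))
        pt ++ [db.flatten]) ([] : List (List Char))
  String.ofList (pvRstripX plaintext.flatten)

-- ===== PORT B =====
def permutation_cipher_decrypt_alt (ciphertext : String) (permutation : List Int) : String :=
  let n := permutation.length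
  let positions := PySem.List.pyRange 0 n
  let src := permutation.map (fun p => PySem.List.pyGetD positions (p - 1) 0)
  let cs := ciphertext.toList
  let blocks := (PySem.List.pyRange 0 cs.length n).map
      (fun i => PySem.List.slice cs (some i) (some (i + n)))
  String.ofList (pvRstripX
    (blocks.flatMap (fun block => src.map (fun j => PySem.List.pyGetD block j ' '))))

-- ===== PRECONDITION & SPEC =====
-- Pre_ excludes: (a) inputs where A raises — an empty permutation (ValueError: range step 0),
-- an entry p with p-1 outside [-n, n) (IndexError building the inverse table), or a nonempty
-- ciphertext whose length is not a multiple of n (IndexError on the short final block); and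
-- (b) nonempty ciphertexts with a key whose decremented entries collide modulo n (not a true
-- permutation), where A still returns but its value is an accident of its implementation: the
-- scatter reads stale zero-initialised slots of the inverse table, so no value is specified there.
def Pre_permutation_cipher_decrypt (ciphertext : String) (permutation : List Int) : Prop :=
  permutation ≠ [] ∧
  (∀ p ∈ permutation, -(permutation.length : Int) ≤ p - 1 ∧ p - 1 < permutation.length) ∧
  (ciphertext.toList = [] ∨
    ((permutation.map (fun p => PySem.Int.mod (p - 1) permutation.length)).Nodup ∧
     ciphertext.toList.length % permutation.length = 0))
instance (ciphertext : String) (permutation : List Int) : Decidable (Pre_permutation_cipher_decrypt ciphertext permutation) := by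
  unfold Pre_permutation_cipher_decrypt; infer_instance

def pvWitness_permutation_cipher_decrypt : String × List Int := ("abXX", [2, 1])

def Spec_permutation_cipher_decrypt (ciphertext : String) (permutation : List Int) (out : String) : Prop := out = permutation_cipher_decrypt_alt ciphertext permutation
instance (ciphertext : String) (permutation : List Int) (out : String) : Decidable (Spec_permutation_cipher_decrypt ciphertext permutation out) := by unfold Spec_permutation_cipher_decrypt; infer_instance

-- ===== CLAIM (what is proved, stated in full; the proofs are below) =====
def Claim_equal_permutation_cipher_decrypt : Prop := ∀ (ciphertext : String) (permutation : List Int), Dom_permutation_cipher_decrypt ciphertext permutation → Pre_permutation_cipher_decrypt ciphertext permutation → Spec_permutation_cipher_decrypt ciphertext permutation (permutation_cipher_decrypt ciphertext permutation)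

-- ===== LEMMAS AND PROOFS =====

def pvIdx (n : ℕ) (i : Int) : ℕ := if 0 ≤ i then i.toNat else (i + n).toNat

lemma pyGetD_inrange {α : Type} (xs : List α) (i : Int) (d : α)
    (h1 : -(xs.length : Int) ≤ i) (h2 : i < xs.length) (h : pvIdx xs.length i < xs.length) :
    PySem.List.pyGetD xs i d = xs[pvIdx xs.length i] := by
  unfold pvIdx at h ⊢
  unfold PySem.List.pyGetD PySem.List.pyGet? PySem.List.pyIdx?
  by_cases h0 : 0 ≤ i
  · simp only [if_pos h0, if_pos h2] at h ⊢
    simp [List.getElem?_eq_getElem h]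
  · simp only [if_neg h0, if_pos h1] at h ⊢
    have he : xs.length - (-i).toNat = (i + xs.length).toNat := by omega
    rw [he]
    simp [List.getElem?_eq_getElem h]

lemma pySetD_inrange {α : Type} (xs : List α) (i : Int) (v : α)
    (h1 : -(xs.length : Int) ≤ i) (h2 : i < xs.length) :
    PySem.List.pySetD xs i v = xs.set (pvIdx xs.length i) v := by
  unfold pvIdx
  unfold PySem.List.pySetD PySem.List.pySet? PySem.List.pyIdx?
  by_cases h0 : 0 ≤ i
  · simp [if_pos h0, if_pos h2]
  · simp only [if_neg h0, if_pos h1]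
    have he : xs.length - (-i).toNat = (i + xs.length).toNat := by omega
    simp [he]

lemma foldl_set_length {α : Type} (l : List (ℕ × α)) (init : List α) :
    (l.foldl (fun acc p => acc.set p.1 p.2) init).length = init.length := by
  induction l generalizing init with
  | nil => rfl
  | cons a l ih => simp [ih]

lemma foldl_set_of_not_mem {α : Type} (l : List (ℕ × α)) (init : List α) (m : ℕ)
    (h : ∀ p ∈ l, p.1 ≠ m) :
    (l.foldl (fun acc p => acc.set p.1 p.2) init)[m]? = init[m]? := by
  induction l generalizing init with
  | nil => rfl
  | cons a l ih =>
    simp only [List.foldl_cons]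
    rw [ih _ (fun p hp => h p (List.mem_cons_of_mem _ hp))]
    exact List.getElem?_set_ne (h a (List.mem_cons_self ..))

lemma foldl_set_getElem? {α : Type} (l : List (ℕ × α)) (init : List α)
    (hnd : (l.map Prod.fst).Nodup) (m : ℕ) (v : α) (hmem : (m, v) ∈ l) (hm : m < init.length) :
    (l.foldl (fun acc p => acc.set p.1 p.2) init)[m]? = some v := by
  induction l generalizing init with
  | nil => cases hmem
  | cons a l ih =>
    simp only [List.map_cons, List.nodup_cons] at hnd
    rcases List.mem_cons.mp hmem with h | h
    · subst h
      simp only [List.foldl_cons]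
      rw [foldl_set_of_not_mem]
      · exact List.getElem?_set_self' .. ▸ by
          simp [List.getElem?_eq_getElem hm]
      · intro p hp he
        exact hnd.1 (List.mem_map.mpr ⟨p, hp, he⟩)
    · have hne : a.1 ≠ m := by
        intro he
        exact hnd.1 (List.mem_map.mpr ⟨(m, v), h, he.symm⟩)
      simp only [List.foldl_cons]
      exact ih (init.set a.1 a.2) hnd.2 h (by simpa using hm)

lemma fold_pySetD_eq_fold_set {α : Type} (n : ℕ) (tgt : ℕ → Int) (val : ℕ → α) (l : List ℕ)
    (hl : ∀ k ∈ l, -(n : Int) ≤ tgt k ∧ tgt k < n) :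
    ∀ init : List α, init.length = n →
      l.foldl (fun acc k => PySem.List.pySetD acc (tgt k) (val k)) init
        = (l.map (fun k => (pvIdx n (tgt k), val k))).foldl (fun acc p => acc.set p.1 p.2) init := by
  induction l with
  | nil => intro init _; rfl
  | cons k l ih =>
    intro init hinit
    simp only [List.foldl_cons, List.map_cons]
    rw [pySetD_inrange _ _ _ (by rw [hinit]; exact (hl k (List.mem_cons_self ..)).1)
          (by rw [hinit]; exact (hl k (List.mem_cons_self ..)).2), hinit]
    exact ih (fun x hx => hl x (List.mem_cons_of_mem _ hx)) _ (by simp [hinit])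

lemma surj_of_nodup (σ : List ℕ) (n : ℕ) (hlen : σ.length = n) (hlt : ∀ m ∈ σ, m < n)
    (hnd : σ.Nodup) (m : ℕ) (hm : m < n) : m ∈ σ := by
  have h1 : σ.toFinset ⊆ Finset.range n := by
    intro x hx
    simp only [Finset.mem_range]
    exact hlt x (List.mem_toFinset.mp hx)
  have h2 : σ.toFinset = Finset.range n := by
    apply Finset.eq_of_subset_of_card_le h1
    rw [Finset.card_range, List.toFinset_card_of_nodup hnd, hlen]
  have : m ∈ σ.toFinset := h2 ▸ Finset.mem_range.mpr hm
  exact List.mem_toFinset.mp this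

def pvFidx (q : List Int) (k : ℕ) : ℕ := pvIdx q.length (q.getD k 0)
def pvSigma (q : List Int) : List ℕ := (List.range q.length).map (pvFidx q)
def pvFinv (q : List Int) (m : ℕ) : ℕ := (pvSigma q).idxOf m

lemma pvIdx_lt (n : ℕ) (i : Int) (h1 : -(n : Int) ≤ i) (h2 : i < n) : pvIdx n i < n := by
  unfold pvIdx; split <;> omega

lemma pvIdx_natCast (n k : ℕ) : pvIdx n (k : Int) = k := by unfold pvIdx; simp

lemma fmod_eq_pvIdx (i : Int) (n : ℕ) (h1 : -(n : Int) ≤ i) (h2 : i < n) :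
    PySem.Int.mod i n = ((pvIdx n i : ℕ) : Int) := by
  unfold PySem.Int.mod pvIdx
  have hf : Int.fmod i n = i % n := by rw [Int.fmod_eq_emod]; simp
  rw [hf]
  split_ifs with h0
  · rw [Int.emod_eq_of_lt h0 h2]; omega
  · have he : (i + n) % (n : Int) = i % n := by
      have := Int.add_mul_emod_self_left (a := i) (b := (n : Int)) (c := 1)
      simpa using this
    rw [← he, Int.emod_eq_of_lt (by omega) (by omega)]; omega

lemma pvFidx_lt (q : List Int) (hrange : ∀ p ∈ q, -(q.length : Int) ≤ p ∧ p < q.length)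
    (k : ℕ) (hk : k < q.length) : pvFidx q k < q.length := by
  have hm : q.getD k 0 ∈ q := by rw [List.getD_eq_getElem _ _ hk]; exact List.getElem_mem hk
  exact pvIdx_lt _ _ (hrange _ hm).1 (hrange _ hm).2

lemma sigma_nodup (q : List Int) (hrange : ∀ p ∈ q, -(q.length : Int) ≤ p ∧ p < q.length)
    (hnd : (q.map (fun p => PySem.Int.mod p q.length)).Nodup) : (pvSigma q).Nodup := by
  have hσ : pvSigma q = (q.map (fun p => PySem.Int.mod p q.length)).map Int.toNat := by
    apply List.ext_getElem (by simp [pvSigma])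
    intro k h1 h2
    simp only [pvSigma, pvFidx, List.getElem_map, List.getElem_range]
    have hk : k < q.length := by simpa [pvSigma] using h1
    have hm : q.getD k 0 ∈ q := by rw [List.getD_eq_getElem _ _ hk]; exact List.getElem_mem hk
    rw [List.getD_eq_getElem _ _ hk, fmod_eq_pvIdx _ _ (hrange _ (List.getElem_mem hk)).1
      (hrange _ (List.getElem_mem hk)).2]
    simp [List.getD_eq_getElem _ _ hk]
  rw [hσ]
  apply List.Nodup.map_on _ hnd
  intro x hx y hy he
  obtain ⟨p, hp, rfl⟩ := List.mem_map.mp hx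
  obtain ⟨r, hr, rfl⟩ := List.mem_map.mp hy
  rw [fmod_eq_pvIdx _ _ (hrange _ hp).1 (hrange _ hp).2,
      fmod_eq_pvIdx _ _ (hrange _ hr).1 (hrange _ hr).2] at he ⊢
  simpa using he

lemma finv_lt (q : List Int) (hrange : ∀ p ∈ q, -(q.length : Int) ≤ p ∧ p < q.length)
    (hnd : (q.map (fun p => PySem.Int.mod p q.length)).Nodup)
    (m : ℕ) (hm : m < q.length) : pvFinv q m < q.length := by
  have hmem : m ∈ pvSigma q := by
    apply surj_of_nodup (pvSigma q) q.length (by simp [pvSigma]) _ (sigma_nodup q hrange hnd) m hm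
    intro x hx
    obtain ⟨k, hk, rfl⟩ := List.mem_map.mp hx
    exact pvFidx_lt q hrange k (by simpa using hk)
  have := List.idxOf_lt_length_of_mem hmem
  simpa [pvSigma] using this

lemma fidx_finv (q : List Int) (hrange : ∀ p ∈ q, -(q.length : Int) ≤ p ∧ p < q.length)
    (hnd : (q.map (fun p => PySem.Int.mod p q.length)).Nodup)
    (m : ℕ) (hm : m < q.length) : pvFidx q (pvFinv q m) = m := by
  have hmem : m ∈ pvSigma q := by
    apply surj_of_nodup (pvSigma q) q.length (by simp [pvSigma]) _ (sigma_nodup q hrange hnd) m hm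
    intro x hx
    obtain ⟨k, hk, rfl⟩ := List.mem_map.mp hx
    exact pvFidx_lt q hrange k (by simpa using hk)
  have h1 := List.idxOf_lt_length_of_mem hmem
  have h2 : (pvSigma q)[(pvSigma q).idxOf m] = m := List.getElem_idxOf h1
  have h4 : (pvSigma q)[(pvSigma q).idxOf m]'h1
      = pvFidx q ((List.range q.length)[(pvSigma q).idxOf m]'(by simpa [pvSigma] using h1)) :=
    List.getElem_map _
  rw [h4, List.getElem_range] at h2
  exact h2

lemma fidx_inj (q : List Int) (hrange : ∀ p ∈ q, -(q.length : Int) ≤ p ∧ p < q.length)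
    (hnd : (q.map (fun p => PySem.Int.mod p q.length)).Nodup)
    (k1 k2 : ℕ) (h1 : k1 < q.length) (h2 : k2 < q.length) (he : pvFidx q k1 = pvFidx q k2) :
    k1 = k2 := by
  have hσ := sigma_nodup q hrange hnd
  have e1 : (pvSigma q)[k1]'(by simpa [pvSigma] using h1) = (pvSigma q)[k2]'(by simpa [pvSigma] using h2) := by
    simpa [pvSigma] using he
  exact (hσ.getElem_inj_iff).mp e1

lemma finv_fidx (q : List Int) (hrange : ∀ p ∈ q, -(q.length : Int) ≤ p ∧ p < q.length)
    (hnd : (q.map (fun p => PySem.Int.mod p q.length)).Nodup)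
    (m : ℕ) (hm : m < q.length) : pvFinv q (pvFidx q m) = m := by
  have hfm : pvFidx q m < q.length := pvFidx_lt q hrange m hm
  exact fidx_inj q hrange hnd _ _ (finv_lt q hrange hnd _ hfm) hm
    (fidx_finv q hrange hnd _ hfm)

def pvInv (q : List Int) : List Int :=
  (PySem.List.enumerate q).foldl (fun inv iv => PySem.List.pySetD inv iv.2 iv.1)
    (List.replicate q.length (0 : Int))

lemma pvInv_eq_fold_set (q : List Int)
    (hrange : ∀ p ∈ q, -(q.length : Int) ≤ p ∧ p < q.length) :
    pvInv q = ((List.range q.length).map (fun k => (pvFidx q k, (k : Int)))).foldl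
        (fun acc p => acc.set p.1 p.2) (List.replicate q.length (0 : Int)) := by
  unfold pvInv
  rw [PySem.List.enumerate_eq_map_pyRange q 0]
  have hlen : PySem.List.len q = (q.length : Int) := by simp [PySem.List.len]
  rw [hlen, PySem.List.pyRange_zero_natCast, List.foldl_map, List.foldl_map]
  have hb : ∀ (acc : List Int), ∀ k ∈ List.range q.length,
      PySem.List.pySetD acc (PySem.List.pyGetD q (k : Int) 0) (k : Int)
        = PySem.List.pySetD acc (q.getD k 0) (k : Int) := by
    intro acc k _
    rw [PySem.List.pyGetD_natCast]
  rw [PySem.List.foldl_congr_mem _ _ _ _ hb]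
  exact fold_pySetD_eq_fold_set q.length (fun k => q.getD k 0) (fun k => (k : Int))
    (List.range q.length)
    (fun k hk => by
      have hkl : k < q.length := List.mem_range.mp hk
      have hm : q.getD k 0 ∈ q := by
        rw [List.getD_eq_getElem _ _ hkl]; exact List.getElem_mem hkl
      exact hrange _ hm)
    _ (by simp)

lemma pvInv_length (q : List Int)
    (hrange : ∀ p ∈ q, -(q.length : Int) ≤ p ∧ p < q.length) :
    (pvInv q).length = q.length := by
  rw [pvInv_eq_fold_set q hrange, foldl_set_length]; simp

lemma pvInv_getElem? (q : List Int)
    (hrange : ∀ p ∈ q, -(q.length : Int) ≤ p ∧ p < q.length)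
    (hnd : (q.map (fun p => PySem.Int.mod p q.length)).Nodup)
    (m : ℕ) (hm : m < q.length) :
    (pvInv q)[m]? = some ((pvFinv q m : ℕ) : Int) := by
  rw [pvInv_eq_fold_set q hrange]
  apply foldl_set_getElem?
  · rw [List.map_map]
    have : (Prod.fst ∘ fun k => (pvFidx q k, (k : Int))) = pvFidx q := rfl
    rw [this]
    exact sigma_nodup q hrange hnd
  · apply List.mem_map.mpr
    exact ⟨pvFinv q m, List.mem_range.mpr (finv_lt q hrange hnd m hm),
      by rw [fidx_finv q hrange hnd m hm]⟩
  · simpa using hm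

lemma block_eq (q : List Int) (block : List Char)
    (hrange : ∀ p ∈ q, -(q.length : Int) ≤ p ∧ p < q.length)
    (hnd : (q.map (fun p => PySem.Int.mod p q.length)).Nodup)
    (hb : block.length = q.length) :
    ((PySem.List.pyRange 0 q.length).foldl
        (fun db j => PySem.List.pySetD db (PySem.List.pyGetD (pvInv q) j 0)
            [PySem.List.pyGetD block j ' '])
        (List.replicate q.length ([] : List Char))).flatten
      = (List.range q.length).map (fun m => PySem.List.pyGetD block ((pvFidx q m : ℕ) : Int) ' ') := by
  have hinvlen := pvInv_length q hrange
  -- the j-loop as a fold over List.range with Nat indices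
  rw [PySem.List.pyRange_zero_natCast, List.foldl_map]
  have hb1 : ∀ (acc : List (List Char)), ∀ k ∈ List.range q.length,
      PySem.List.pySetD acc (PySem.List.pyGetD (pvInv q) (k : Int) 0) [PySem.List.pyGetD block (k : Int) ' ']
        = PySem.List.pySetD acc ((pvFinv q k : ℕ) : Int) [PySem.List.pyGetD block (k : Int) ' '] := by
    intro acc k hk
    have hkl : k < q.length := List.mem_range.mp hk
    rw [PySem.List.pyGetD_natCast, List.getD_eq_getElem?_getD,
        pvInv_getElem? q hrange hnd k hkl]
    rfl
  rw [PySem.List.foldl_congr_mem _ _ _ _ hb1]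
  rw [fold_pySetD_eq_fold_set q.length (fun k => ((pvFinv q k : ℕ) : Int))
      (fun k => [PySem.List.pyGetD block (k : Int) ' ']) (List.range q.length)
      (fun k hk => ⟨by simp, by have := finv_lt q hrange hnd k (List.mem_range.mp hk); simp only []; exact_mod_cast this⟩)
      _ (by simp)]
  -- characterise the scatter result and flatten it
  have hdb : ((List.range q.length).map
        (fun k => (pvIdx q.length ((pvFinv q k : ℕ) : Int), [PySem.List.pyGetD block (k : Int) ' ']))).foldl
        (fun acc p => acc.set p.1 p.2) (List.replicate q.length ([] : List Char))
      = (List.range q.length).map (fun m => [PySem.List.pyGetD block ((pvFidx q m : ℕ) : Int) ' ']) := by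
    apply List.ext_getElem?
    intro m
    by_cases hm : m < q.length
    · rw [foldl_set_getElem?]
      · rw [List.getElem?_map, List.getElem?_range hm]
        rfl
      · rw [List.map_map]
        apply List.Nodup.map_on _ (List.nodup_range)
        intro x hx y hy he
        simp only [Function.comp, pvIdx_natCast] at he
        have hx' := List.mem_range.mp hx
        have hy' := List.mem_range.mp hy
        have e2 : pvFidx q (pvFinv q x) = pvFidx q (pvFinv q y) := by rw [he]
        rw [fidx_finv q hrange hnd x hx', fidx_finv q hrange hnd y hy'] at e2
        exact e2
      · apply List.mem_map.mpr
        refine ⟨pvFidx q m, List.mem_range.mpr (pvFidx_lt q hrange m hm), ?_⟩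
        rw [pvIdx_natCast, finv_fidx q hrange hnd m hm]
      · simpa using hm
    · rw [List.getElem?_eq_none, List.getElem?_eq_none]
      · simpa using hm
      · rw [foldl_set_length]; simpa using hm
  rw [hdb]
  -- flatten of singletons, then match the gather side
  have hfl : ∀ (l : List ℕ) (g : ℕ → Char), (l.map (fun m => [g m])).flatten = l.map g := by
    intro l g
    induction l with
    | nil => rfl
    | cons a l ih => simp [ih]
  rw [hfl]

theorem permutation_cipher_decrypt_spec : Claim_equal_permutation_cipher_decrypt := by
  intro ct perm _ hpre
  unfold Spec_permutation_cipher_decrypt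
  obtain ⟨hne, hrangeP, hrest⟩ := hpre
  have hq0 : 0 < (perm.map (fun p => p - 1)).length := by
    simpa [List.length_pos_iff] using hne
  set q : List Int := perm.map (fun p => p - 1) with hqdef
  have hql : q.length = perm.length := by simp [hqdef]
  have hrange : ∀ p ∈ q, -(q.length : Int) ≤ p ∧ p < q.length := by
    intro p hp
    obtain ⟨r, hr, rfl⟩ := List.mem_map.mp hp
    rw [hql]
    exact hrangeP r hr
  have hnd' : ct.toList = [] ∨
      ((q.map (fun p => PySem.Int.mod p q.length)).Nodup ∧ ct.toList.length % q.length = 0) := by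
    rcases hrest with h | ⟨h1, h2⟩
    · exact Or.inl h
    · refine Or.inr ⟨?_, by rw [hql]; exact h2⟩
      rw [hql, hqdef, List.map_map]
      exact h1
  have hRlen : (PySem.List.pyRange 0 (q.length : Int)).length = q.length := by
    simp [PySem.List.length_pyRange_one]
  have hsrc : perm.map (fun p => PySem.List.pyGetD (PySem.List.pyRange 0 (q.length : Int)) (p - 1) 0)
      = (List.range q.length).map (fun k => ((pvFidx q k : ℕ) : Int)) := by
    apply List.ext_getElem (by simp [hql])
    intro k h1 h2
    simp only [List.getElem_map, List.getElem_range]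
    have hk : k < perm.length := by simpa using h1
    have hr := hrangeP _ (List.getElem_mem hk)
    have e := pyGetD_inrange (PySem.List.pyRange 0 (q.length : Int)) (perm[k] - 1) 0
      (by rw [hRlen, hql]; exact hr.1) (by rw [hRlen, hql]; exact hr.2)
      (by rw [hRlen]; exact pvIdx_lt _ _ (by rw [hql]; exact hr.1) (by rw [hql]; exact hr.2))
    have hq_k : q.getD k 0 = perm[k] - 1 := by
      rw [hqdef, List.getD_eq_getElem _ _ (by simpa using hk)]
      simp
    rw [e, PySem.List.getElem_pyRange_one]
    simp only [pvFidx, hRlen, hq_k, zero_add]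
  simp only [permutation_cipher_decrypt, permutation_cipher_decrypt_alt,
    PySem.List.foldl_append_singleton_eq_map, List.nil_append, List.flatMap_def, List.map_map,
    ← hqdef]
  rw [← hql]
  apply congrArg
  apply congrArg
  apply congrArg
  apply List.map_congr_left
  intro i hi
  simp only [Function.comp_apply]
  rw [← List.map_map, hsrc, List.map_map]
  have hstep : (0 : Int) < (q.length : Int) := by exact_mod_cast hq0.trans_le (le_of_eq (by rw [hqdef]))
  obtain ⟨h0i, hiL, hdvd⟩ := (PySem.List.mem_pyRange_iff_of_pos hstep i).mp hi
  have hL0 : 0 < ct.toList.length := by exact_mod_cast lt_of_le_of_lt h0i hiL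
  have hctne : ct.toList ≠ [] := by
    intro h; rw [h] at hL0; simp at hL0
  obtain ⟨hnd2, hmod⟩ := hnd'.resolve_left hctne
  have hdvdL : (q.length : Int) ∣ (ct.toList.length : Int) := by
    exact_mod_cast Nat.dvd_of_mod_eq_zero hmod
  have hdvdi : (q.length : Int) ∣ i := by simpa using hdvd
  obtain ⟨a, ha⟩ := hdvdi
  obtain ⟨b, hb⟩ := hdvdL
  have hain : i + (q.length : Int) ≤ (ct.toList.length : Int) := by
    have hab : a < b := by
      have hm : (q.length : Int) * a < q.length * b := by rw [← ha, ← hb]; exact hiL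
      exact lt_of_mul_lt_mul_left hm (by positivity)
    calc i + (q.length : Int) = q.length * (a + 1) := by rw [ha]; ring
      _ ≤ q.length * b := by
          apply mul_le_mul_of_nonneg_left (by omega) (by positivity)
      _ = _ := hb.symm
  have hblock : (PySem.List.slice ct.toList (some i) (some (i + (q.length : Int)))).length = q.length := by
    rw [PySem.List.slice_of_nonneg _ h0i (by omega) (by omega) hain]
    rw [List.length_take, List.length_drop]
    omega
  have hbe := block_eq q (PySem.List.slice ct.toList (some i) (some (i + (q.length : Int))))
    hrange hnd2 hblock
  simpa only [pvInv, Function.comp_def] using hbe
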